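-- pv_equiv track=rewrite | github.com/beom090/Algo | 프로그래머스/lv0/120913. 잘라서 배열로 저장하기/잘라서 배열로 저장하기.py | solution
-- ===== SOURCE A (Python) =====
-- def solution(my_str, n):
--     answer = []
--     my_str = list(my_str)
--
--     iter = len(my_str) // n
--
--     rest = len(my_str) % n
--
--     for idx_n in range(iter):
--         mylist=[]
--
--         for idx_str in range(idx_n * n,(idx_n + 1) * n):
--
--             mylist.append(my_str[idx_str])
--         answer.append(''.join(mylist))
--
--     if rest != 0:
--         mylist = my_str[iter * n:]
--         answer.append(''.join(mylist))
--
--     return answer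
-- ===== SOURCE B (Python) =====
-- def solution(my_str, n):
--     answer = []
--     for i in range(0, len(my_str), n):
--         answer.append(my_str[i:i+n])
--     return answer
-- ===== Notes on version B (the rewrite author's own statement) =====
-- stated objective: simpler
-- what changed: One loop over slice start positions with stride n replaces A's precomputed quotient/remainder, the nested per-character inner loop with join, and the separate trailing-remainder branch; bulk slicing also avoids per-character Python-level work.
-- outside the precondition, e.g. on solution('abcde', -2): A returns [''], B returns []; on solution('abcd', -2): A returns [], B returns []
import Mathlib
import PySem

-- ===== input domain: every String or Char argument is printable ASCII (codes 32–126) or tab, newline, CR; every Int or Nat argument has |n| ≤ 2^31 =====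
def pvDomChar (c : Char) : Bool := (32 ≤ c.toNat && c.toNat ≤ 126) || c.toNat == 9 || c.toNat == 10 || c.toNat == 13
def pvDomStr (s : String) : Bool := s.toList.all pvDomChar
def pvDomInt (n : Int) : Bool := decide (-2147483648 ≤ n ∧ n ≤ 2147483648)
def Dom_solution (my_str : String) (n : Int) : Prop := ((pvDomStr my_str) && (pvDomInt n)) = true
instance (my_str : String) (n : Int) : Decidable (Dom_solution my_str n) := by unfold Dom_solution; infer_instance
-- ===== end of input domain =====

-- B replaces A's quotient/remainder bookkeeping, nested per-character inner loop and separate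
-- trailing-remainder branch by one stride-n slicing loop (objective: simpler).

-- ===== PORT A =====
def solution (my_str : String) (n : Int) : List String :=
  let chars := my_str.toList                                  -- my_str = list(my_str)
  let iter := PySem.Int.floordiv (chars.length : Int) n
  let rest := PySem.Int.mod (chars.length : Int) n
  let answer := (PySem.List.pyRange 0 iter 1).foldl (fun answer idx_n =>
      let mylist := (PySem.List.pyRange (idx_n * n) ((idx_n + 1) * n) 1).foldl
        (fun mylist idx_str => mylist ++ [PySem.List.pyGetD chars idx_str ' '])
        ([] : List Char)                                      -- index always in range when n ≥ 1 (Pre_)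
      answer ++ [String.ofList mylist]) ([] : List String)
  if rest ≠ 0 then answer ++ [String.ofList (PySem.List.slice chars (some (iter * n)) none)]
  else answer

-- ===== PORT B =====
def solution_alt (my_str : String) (n : Int) : List String :=
  let chars := my_str.toList
  (PySem.List.pyRange 0 (chars.length : Int) n).foldl
    (fun answer i => answer ++ [String.ofList (PySem.List.slice chars (some i) (some (i + n)))])
    ([] : List String)

-- ===== PRECONDITION & SPEC =====
-- Pre_ excludes n ≤ 0: at n = 0 A raises ZeroDivisionError, and a negative chunk size is a
-- nonsensical corner no caller would specify, where A's occasional [''] (an artefact of its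
-- remainder branch) and B's [] are both accidental.
def Pre_solution (my_str : String) (n : Int) : Prop := 1 ≤ n
instance (my_str : String) (n : Int) : Decidable (Pre_solution my_str n) := by
  unfold Pre_solution; infer_instance
def pvWitness_solution : String × Int := ("abcde", 2)

def Spec_solution (my_str : String) (n : Int) (out : List String) : Prop := out = solution_alt my_str n
instance (my_str : String) (n : Int) (out : List String) : Decidable (Spec_solution my_str n out) := by unfold Spec_solution; infer_instance

-- ===== CLAIM (what is proved, stated in full; the proofs are below) =====
def Claim_equal_solution : Prop := ∀ (my_str : String) (n : Int), Dom_solution my_str n → Pre_solution my_str n → Spec_solution my_str n (solution my_str n)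

-- ===== LEMMAS AND PROOFS =====

-- consecutive getD reads form a drop/take window
lemma map_getD_range {α : Type} (xs : List α) (d : α) (a c : Nat) (h : a + c ≤ xs.length) :
    (List.range c).map (fun j => xs.getD (a + j) d) = (xs.drop a).take c := by
  induction c generalizing a with
  | zero => simp
  | succ c ih =>
    have ha : a < xs.length := by omega
    rw [List.range_succ_eq_map, List.map_cons, List.map_map,
        List.drop_eq_getElem_cons ha, List.take_succ_cons]
    congr 1
    · simp [List.getD_eq_getElem?_getD, List.getElem?_eq_getElem ha]
    · rw [← ih (a + 1) (by omega)]
      apply List.map_congr_left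
      intro j _
      show xs.getD (a + (j + 1)) d = xs.getD (a + 1 + j) d
      congr 1
      omega

-- A's inner per-character loop builds exactly the k-th window of width m
lemma chunkA (cs : List Char) (m k : Nat) (h : (k + 1) * m ≤ cs.length) :
    ((PySem.List.pyRange ((k : Int) * (m : Int)) (((k : Int) + 1) * (m : Int)) 1).foldl
      (fun mylist idx_str => mylist ++ [PySem.List.pyGetD cs idx_str ' ']) []) =
      (cs.drop (k * m)).take m := by
  rw [PySem.List.foldl_append_singleton_eq_map, List.nil_append, PySem.List.pyRange_one]
  have hb : (((k : Int) + 1) * (m : Int) - (k : Int) * (m : Int)).toNat = m := by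
    have h1 : ((k : Int) + 1) * (m : Int) - (k : Int) * (m : Int) = (m : Int) := by ring
    rw [h1, Int.toNat_natCast]
  rw [hb, List.map_map, ← map_getD_range cs ' ' (k * m) m (by
    have h2 : k * m + m = (k + 1) * m := by ring
    omega)]
  apply List.map_congr_left
  intro j _
  show PySem.List.pyGetD cs ((k : Int) * (m : Int) + (j : Int)) ' ' = cs.getD (k * m + j) ' '
  have h2 : (k : Int) * (m : Int) + (j : Int) = ((k * m + j : Nat) : Int) := by push_cast; ring
  rw [h2, PySem.List.pyGetD_natCast]

-- ceiling division, in Nat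
lemma nat_ceil (L m : Nat) (hm : 1 ≤ m) :
    (L + m - 1) / m = L / m + (if L % m = 0 then 0 else 1) := by
  have hd := Nat.div_add_mod L m
  set q := L / m with hq
  set r := L % m with hr
  have hrm : r < m := Nat.mod_lt _ hm
  by_cases h0 : r = 0
  · rw [if_pos h0]
    have h1 : L + m - 1 = m * q + (m - 1) := by omega
    rw [h1, Nat.mul_add_div (by omega), Nat.div_eq_of_lt (by omega)]
  · rw [if_neg h0]
    have h1 : L + m - 1 = m * (q + 1) + (r - 1) := by
      rw [Nat.mul_add, Nat.mul_one]; omega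
    rw [h1, Nat.mul_add_div (by omega), Nat.div_eq_of_lt (by omega)]

-- Python's ceil-division range length, cast down to Nat
lemma ceil_toNat (L m : Nat) (hm : 1 ≤ m) :
    (if (0:Int) < (L:Int) then (((L:Int) - 0 + (m:Int) - 1) / (m:Int)).toNat else 0)
      = L / m + (if L % m = 0 then 0 else 1) := by
  by_cases hL0 : 0 < L
  · rw [if_pos (by exact_mod_cast hL0)]
    have h1 : (L:Int) - 0 + (m:Int) - 1 = ((L + m - 1 : Nat) : Int) := by
      push_cast [Nat.cast_sub (by omega : 1 ≤ L + m)]; ring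
    rw [h1, ← Int.natCast_div, Int.toNat_natCast, nat_ceil L m hm]
  · rw [if_neg (by exact_mod_cast hL0)]
    have h0 : L = 0 := by omega
    simp [h0]

-- A's whole body equals the chunk list, written as one map over chunk indices
lemma A_eq' (cs : List Char) (m : Nat) (hm : 1 ≤ m) :
    (if PySem.Int.mod (cs.length : Int) (m : Int) ≠ 0 then
      ((PySem.List.pyRange 0 (PySem.Int.floordiv (cs.length : Int) (m : Int)) 1).foldl
        (fun answer idx_n =>
          answer ++ [String.ofList
            ((PySem.List.pyRange (idx_n * (m:Int)) ((idx_n + 1) * (m:Int)) 1).foldl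
              (fun mylist idx_str => mylist ++ [PySem.List.pyGetD cs idx_str ' ']) [])])
        ([] : List String)) ++
        [String.ofList (PySem.List.slice cs (some (PySem.Int.floordiv (cs.length : Int) (m : Int) * (m:Int))) none)]
     else
      ((PySem.List.pyRange 0 (PySem.Int.floordiv (cs.length : Int) (m : Int)) 1).foldl
        (fun answer idx_n =>
          answer ++ [String.ofList
            ((PySem.List.pyRange (idx_n * (m:Int)) ((idx_n + 1) * (m:Int)) 1).foldl
              (fun mylist idx_str => mylist ++ [PySem.List.pyGetD cs idx_str ' ']) [])])
        ([] : List String))) =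
      (List.range (cs.length / m + (if cs.length % m = 0 then 0 else 1))).map
        (fun k => String.ofList ((cs.drop (k * m)).take m)) := by
  rw [PySem.Int.floordiv_natCast, PySem.Int.mod_natCast]
  have hd := Nat.div_add_mod cs.length m
  have hr : cs.length % m < m := Nat.mod_lt _ hm
  set L := cs.length with hL
  set q := L / m with hq
  set r := L % m with hrr
  have hans : ((PySem.List.pyRange 0 ((q : Nat) : Int) 1).foldl
        (fun answer idx_n =>
          answer ++ [String.ofList
            ((PySem.List.pyRange (idx_n * (m:Int)) ((idx_n + 1) * (m:Int)) 1).foldl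
              (fun mylist idx_str => mylist ++ [PySem.List.pyGetD cs idx_str ' ']) [])])
        ([] : List String)) =
      (List.range q).map (fun k => String.ofList ((cs.drop (k * m)).take m)) := by
    rw [PySem.List.pyRange_zero_natCast, PySem.List.foldl_append_singleton_eq_map,
        List.nil_append, List.map_map]
    apply List.map_congr_left
    intro k hk
    have hk' : k < q := List.mem_range.mp hk
    have hb : (k + 1) * m ≤ cs.length := by
      calc (k + 1) * m ≤ q * m := Nat.mul_le_mul_right m hk'
      _ = m * q := Nat.mul_comm _ _
      _ ≤ L := by omega
    show String.ofList ((PySem.List.pyRange ((k:Int) * (m:Int)) (((k:Int) + 1) * (m:Int)) 1).foldl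
              (fun mylist idx_str => mylist ++ [PySem.List.pyGetD cs idx_str ' ']) []) = _
    rw [chunkA cs m k hb]
  by_cases h0 : r = 0
  · rw [if_neg (by simp [h0]), hans, h0]
    simp
  · rw [if_pos (by exact_mod_cast h0), hans]
    rw [if_neg h0, List.range_succ, List.map_append]
    congr 1
    have h1 : ((q:Int)) * (m:Int) = ((q * m : Nat) : Int) := by push_cast; ring
    rw [h1, PySem.List.slice_from_natCast]
    have h2 : (cs.drop (q * m)).take m = cs.drop (q * m) := by
      apply List.take_of_length_le
      rw [List.length_drop]
      have h3 : q * m = m * q := Nat.mul_comm _ _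
      omega
    simp [h2]

lemma A_eq (s : String) (m : Nat) (hm : 1 ≤ m) :
    solution s (m : Int) =
      (List.range (s.toList.length / m + (if s.toList.length % m = 0 then 0 else 1))).map
        (fun k => String.ofList ((s.toList.drop (k * m)).take m)) := by
  exact A_eq' s.toList m hm

-- B's whole body equals the same chunk list
lemma B_eq' (cs : List Char) (m : Nat) (hm : 1 ≤ m) :
    (PySem.List.pyRange 0 (cs.length : Int) (m : Int)).foldl
      (fun answer i => answer ++ [String.ofList (PySem.List.slice cs (some i) (some (i + (m:Int))))])
      ([] : List String) =
      (List.range (cs.length / m + (if cs.length % m = 0 then 0 else 1))).map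
        (fun k => String.ofList ((cs.drop (k * m)).take m)) := by
  rw [PySem.List.pyRange_of_pos 0 (cs.length : Int) (by exact_mod_cast hm : (0:Int) < (m:Int)),
      PySem.List.foldl_append_singleton_eq_map, List.nil_append, List.map_map,
      ceil_toNat cs.length m hm]
  apply List.map_congr_left
  intro k _
  show String.ofList (PySem.List.slice cs (some (0 + (m:Int) * k)) (some (0 + (m:Int) * k + m))) = _
  have h1 : (0 + (m:Int) * (k:Int)) = ((k * m : Nat) : Int) := by push_cast; ring
  rw [h1, PySem.List.slice_natCast_add]

lemma B_eq (s : String) (m : Nat) (hm : 1 ≤ m) :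
    solution_alt s (m : Int) =
      (List.range (s.toList.length / m + (if s.toList.length % m = 0 then 0 else 1))).map
        (fun k => String.ofList ((s.toList.drop (k * m)).take m)) := by
  exact B_eq' s.toList m hm

-- ===== VERDICT (by name: the statement is the Claim_ definition above) =====
theorem solution_spec : Claim_equal_solution := by
  intro s n _ hpre
  obtain ⟨m, rfl⟩ := Int.eq_ofNat_of_zero_le (le_trans (by norm_num) hpre : (0:Int) ≤ n)
  have hm : 1 ≤ m := by unfold Pre_solution at hpre; exact_mod_cast hpre
  show solution s (m : Int) = solution_alt s (m : Int)
  rw [A_eq s m hm, B_eq s m hm]
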